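-- pv_equiv track=rewrite | github.com/rengotaku/obsidian-importer | src/obsidian_etl/pipelines/organize/nodes.py | _yaml_quote
-- ===== SOURCE A (Python) =====
-- def _yaml_quote(value: str) -> str:
--     """Quote a string value for YAML if it contains special characters.
--
--     YAML special characters that need quoting: : # [ ] { } , & * ? | - < > = ! % @ `
--     Also quotes strings that start/end with spaces or contain newlines.
--     """
--     if value is None:
--         return '""'  # Empty quoted string for None
--
--     if not isinstance(value, str):
--         return str(value)
--
--     # Characters that require quoting in YAML
--     special_chars = set(":,[]{}#&*?|-><=!%@`\"'\n")
--
--     needs_quoting = (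
--         any(c in value for c in special_chars)
--         or value.startswith(" ")
--         or value.endswith(" ")
--         or value.startswith("-")
--         or value.lower() in ("true", "false", "null", "yes", "no", "on", "off")
--     )
--
--     if needs_quoting:
--         # Escape double quotes and wrap in double quotes
--         escaped = value.replace("\\", "\\\\").replace('"', '\\"')
--         return f'"{escaped}"'
--
--     return value
-- ===== SOURCE B (Python) =====
-- # Single fused pass: one loop over the characters simultaneously decides whether
-- # quoting is needed and builds the escaped text, instead of A's ~20 membership
-- # scans, startswith/endswith calls and two separate str.replace passes.
-- _SPECIALS = ':,[]{}#&*?|-><=!%@`"\'\n'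
-- _ESCAPES = {"\\": "\\\\", '"': '\\"'}
-- _KEYWORDS = frozenset(("true", "false", "null", "yes", "no", "on", "off"))
--
--
-- def _yaml_quote(value: str) -> str:
--     """Quote a string value for YAML if it contains special characters."""
--     if value is None:
--         return '""'
--
--     if not isinstance(value, str):
--         return str(value)
--
--     quote = value.lower() in _KEYWORDS
--     parts = []
--     last = len(value) - 1
--     for i, ch in enumerate(value):
--         if (ch in _SPECIALS
--                 or (i == 0 and ch in " -")
--                 or (i == last and ch == " ")):
--             quote = True
--         parts.append(_ESCAPES.get(ch, ch))
--
--     return '"' + "".join(parts) + '"' if quote else value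
-- ===== Notes on version B (the rewrite author's own statement) =====
-- stated objective: alternative
-- what changed: B fuses everything into one loop over the characters: a single pass simultaneously decides needs_quoting (special char, leading space/dash, trailing space via the index) and builds the escaped text through a per-character escape table, replacing A's ~20 separate membership scans, startswith/endswith calls and two whole-string str.replace passes.
import Mathlib
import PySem

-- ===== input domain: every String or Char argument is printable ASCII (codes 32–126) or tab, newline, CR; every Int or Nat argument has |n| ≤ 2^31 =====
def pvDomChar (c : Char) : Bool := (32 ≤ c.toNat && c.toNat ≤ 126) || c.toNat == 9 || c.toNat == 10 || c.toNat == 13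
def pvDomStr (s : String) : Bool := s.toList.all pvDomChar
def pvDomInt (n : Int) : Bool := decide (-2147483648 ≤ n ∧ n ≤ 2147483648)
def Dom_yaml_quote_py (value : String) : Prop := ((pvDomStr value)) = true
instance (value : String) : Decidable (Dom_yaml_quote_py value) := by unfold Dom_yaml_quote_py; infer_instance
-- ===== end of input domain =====

-- B fuses A's many membership scans, startswith/endswith calls and two str.replace passes
-- into ONE loop that both decides needs_quoting and builds the escaped text (alternative).

-- ===== PORT A =====
-- special_chars = set(":,[]{}#&*?|-><=!%@`\"'\n")
def yamlSpecialsA : PySem.Set Char := PySem.Set.ofList ":,[]{}#&*?|-><=!%@`\"'\n".toList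

def yamlKeywords : List String := ["true", "false", "null", "yes", "no", "on", "off"]

def yaml_quote_py (value : String) : String :=
  -- value is a str, so the None / non-str guards do not fire
  let needs_quoting :=
    (yamlSpecialsA.any (fun c => PySem.Chars.isIn [c] value.toList))
    || PySem.Str.startswith value " "
    || PySem.Str.endswith value " "
    || PySem.Str.startswith value "-"
    || yamlKeywords.contains (PySem.Str.lower value)
  if needs_quoting then
    let escaped := PySem.Str.replace (PySem.Str.replace value "\\" "\\\\") "\"" "\\\""
    "\"" ++ escaped ++ "\""
  else
    value

-- ===== PORT B =====
-- the string _SPECIALS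
def yamlClassB : List Char := ":,[]{}#&*?|-><=!%@`\"'\n".toList

-- _ESCAPES.get(ch, ch): the per-character escape table of Source B
def yamlEsc (c : Char) : List Char :=
  if c == '\\' then ['\\', '\\'] else if c == '"' then ['\\', '"'] else [c]

-- Source B's single 'for i, ch in enumerate(value)' loop: 'first' tracks i == 0,
-- 'rest.isEmpty' is i == last; returns (quote flag contribution, escaped parts)
def yamlScanB (first : Bool) : List Char → Bool × List Char
  | [] => (false, [])
  | c :: rest =>
    let r := yamlScanB false rest
    (yamlClassB.contains c || (first && (c == ' ' || c == '-'))
       || (rest.isEmpty && c == ' ') || r.1,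
     yamlEsc c ++ r.2)

def yaml_quote_py_alt (value : String) : String :=
  let kw := yamlKeywords.contains (PySem.Str.lower value)
  let r := yamlScanB true value.toList
  -- '"'.join over single-/double-char pieces, i.e. concatenation: String.ofList
  if kw || r.1 then "\"" ++ String.ofList r.2 ++ "\"" else value

-- ===== PRECONDITION & SPEC =====
def Spec_yaml_quote_py (value : String) (out : String) : Prop := out = yaml_quote_py_alt value
instance (value : String) (out : String) : Decidable (Spec_yaml_quote_py value out) := by unfold Spec_yaml_quote_py; infer_instance

-- ===== CLAIM (what is proved, stated in full; the proofs are below) =====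
def Claim_equal_yaml_quote_py : Prop := ∀ (value : String), Dom_yaml_quote_py value → Spec_yaml_quote_py value (yaml_quote_py value)

-- ===== LEMMAS AND PROOFS =====

theorem singleton_prefix_iff (c : Char) (l : List Char) : [c] <+: l ↔ l.head? = some c := by
  cases l with
  | nil => simp
  | cons a t =>
    constructor
    · rintro ⟨s, hs⟩; injection hs with h _; simp [h]
    · intro h; simp only [List.head?_cons, Option.some.injEq] at h; exact ⟨t, by simp [h]⟩

theorem singleton_suffix_iff (c : Char) (l : List Char) : [c] <:+ l ↔ l.getLast? = some c := by
  rw [List.getLast?_eq_some_iff]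
  constructor
  · rintro ⟨t, rfl⟩; exact ⟨t, rfl⟩
  · rintro ⟨t, rfl⟩; exact ⟨t, rfl⟩

theorem singleton_infix_iff (c : Char) (l : List Char) : [c] <:+: l ↔ c ∈ l := by
  rw [List.mem_iff_append]
  constructor
  · rintro ⟨s, t, rfl⟩; exact ⟨s, t, by simp⟩
  · rintro ⟨s, t, rfl⟩; exact ⟨s, t, by simp⟩

theorem isIn_singleton (c : Char) (l : List Char) : PySem.Chars.isIn [c] l = l.contains c := by
  rw [Bool.eq_iff_iff, PySem.Chars.isIn_iff_infix, singleton_infix_iff]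
  simp

theorem startswith_singleton (c : Char) (l : List Char) :
    PySem.Chars.startswith l [c] = (l.head? == some c) := by
  rw [Bool.eq_iff_iff, PySem.Chars.startswith_iff, singleton_prefix_iff]
  simp

theorem endswith_singleton (c : Char) (l : List Char) :
    PySem.Chars.endswith l [c] = (l.getLast? == some c) := by
  rw [Bool.eq_iff_iff, PySem.Chars.endswith_iff, singleton_suffix_iff]
  simp

-- A's generator 'any(c in value for c in special_chars)' over the set equals one any over value
theorem anyA_eq (l : List Char) :
    yamlSpecialsA.any (fun c => PySem.Chars.isIn [c] l)
      = l.any (fun c => yamlClassB.contains c) := by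
  rw [Bool.eq_iff_iff]
  simp only [List.any_eq_true, isIn_singleton, List.contains_iff_mem]
  constructor
  · rintro ⟨c, hc, hl⟩
    exact ⟨c, hl, (PySem.Set.mem_ofList _ _).mp hc⟩
  · rintro ⟨c, hl, hc⟩
    exact ⟨c, (PySem.Set.mem_ofList _ _).mpr hc, hl⟩

-- the flag of the scan with first = false: class anywhere, or trailing space
theorem yamlScanB_fst_false (l : List Char) :
    (yamlScanB false l).1 = (l.any (fun c => yamlClassB.contains c) || l.getLast? == some ' ') := by
  induction l with
  | nil => simp [yamlScanB]
  | cons c rest ih =>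
    rw [show (yamlScanB false (c :: rest)).1
          = (yamlClassB.contains c || (false && (c == ' ' || c == '-'))
             || (rest.isEmpty && c == ' ') || (yamlScanB false rest).1) from rfl, ih]
    cases rest with
    | nil => simp
    | cons d t =>
      rw [Bool.eq_iff_iff]
      simp only [List.any_cons, List.getLast?_cons_cons, List.isEmpty_cons, Bool.false_and,
        Bool.or_false, Bool.or_eq_true]
      tauto

theorem yamlScanB_fst_true (l : List Char) :
    (yamlScanB true l).1 =
      (l.any (fun c => yamlClassB.contains c)
        || (l.head? == some ' ' || l.head? == some '-')
        || l.getLast? == some ' ') := by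
  cases l with
  | nil => simp [yamlScanB]
  | cons c rest =>
    rw [show (yamlScanB true (c :: rest)).1
          = (yamlClassB.contains c || (true && (c == ' ' || c == '-'))
             || (rest.isEmpty && c == ' ') || (yamlScanB false rest).1) from rfl,
      yamlScanB_fst_false rest, Bool.eq_iff_iff]
    cases rest with
    | nil =>
      simp only [List.any_cons, List.any_nil, List.head?_cons, List.getLast?_singleton,
        List.getLast?_nil, List.isEmpty_nil, Bool.true_and, Bool.or_false, Bool.false_or,
        Bool.or_eq_true, beq_iff_eq, Option.some.injEq]
      tauto
    | cons d t =>
      simp only [List.any_cons, List.head?_cons, List.getLast?_cons_cons, List.isEmpty_cons,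
        Bool.true_and, Bool.false_and, Bool.or_false, Bool.or_eq_true, beq_iff_eq,
        Option.some.injEq]
      tauto

-- the escaped text of the scan is the per-character expansion, independent of 'first'
theorem yamlScanB_snd (first : Bool) (l : List Char) :
    (yamlScanB first l).2 = l.flatMap yamlEsc := by
  induction l generalizing first with
  | nil => simp [yamlScanB]
  | cons c rest ih =>
    rw [show (yamlScanB first (c :: rest)).2 = yamlEsc c ++ (yamlScanB false rest).2 from rfl,
      ih false, List.flatMap_cons]

-- replace with a single-character pattern is a per-character expansion
theorem replace_go_single (o : Char) (new : List Char) :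
    ∀ (fuel : Nat) (l acc : List Char), l.length ≤ fuel →
      PySem.Chars.replace.go [o] new fuel l acc
        = acc.reverse ++ l.flatMap (fun c => if c == o then new else [c]) := by
  intro fuel
  induction fuel with
  | zero =>
    intro l acc hl
    have : l = [] := List.eq_nil_of_length_eq_zero (Nat.le_zero.mp hl)
    subst this
    simp [PySem.Chars.replace.go]
  | succ n ih =>
    intro l acc hl
    cases l with
    | nil => simp [PySem.Chars.replace.go]
    | cons c t =>
      rw [show PySem.Chars.replace.go [o] new (n + 1) (c :: t) acc
            = (if [o].isPrefixOf (c :: t) then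
                 PySem.Chars.replace.go [o] new n (List.drop [o].length (c :: t)) (new.reverse ++ acc)
               else PySem.Chars.replace.go [o] new n t (c :: acc)) from rfl]
      have ht : t.length ≤ n := by simpa using hl
      by_cases hc : c = o
      · subst hc
        rw [if_pos (by simp [List.isPrefixOf]), List.length_cons]
        simp only [List.length_nil, Nat.zero_add, List.drop_succ_cons, List.drop_zero]
        rw [ih t (new.reverse ++ acc) ht]
        simp
      · rw [if_neg (by simp [List.isPrefixOf]; exact fun h => hc h.symm), ih t (c :: acc) ht]
        simp [hc]

theorem replace_single (o : Char) (new l : List Char) :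
    PySem.Chars.replace l [o] new = l.flatMap (fun c => if c == o then new else [c]) := by
  rw [show PySem.Chars.replace l [o] new
        = PySem.Chars.replace.go [o] new l.length l [] from rfl,
    replace_go_single o new l.length l [] (Nat.le_refl _)]
  simp

-- A's two staged replace passes equal B's one-pass per-character escape table
theorem double_replace_eq (l : List Char) :
    PySem.Chars.replace (PySem.Chars.replace l ['\\'] ['\\', '\\']) ['"'] ['\\', '"']
      = l.flatMap yamlEsc := by
  rw [replace_single, replace_single, List.flatMap_assoc]
  induction l with
  | nil => simp
  | cons c t ih =>
    rw [List.flatMap_cons, List.flatMap_cons, ih]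
    congr 1
    by_cases h1 : c = '\\'
    · subst h1; decide
    · by_cases h2 : c = '"'
      · subst h2; decide
      · simp [h1, h2, yamlEsc]

-- ===== VERDICT (by name: the statement is the Claim_ definition above) =====
theorem yaml_quote_py_spec : Claim_equal_yaml_quote_py := by
  intro value _
  unfold Spec_yaml_quote_py yaml_quote_py yaml_quote_py_alt
  have hcond :
      ((yamlSpecialsA.any (fun c => PySem.Chars.isIn [c] value.toList))
        || PySem.Str.startswith value " "
        || PySem.Str.endswith value " "
        || PySem.Str.startswith value "-"
        || yamlKeywords.contains (PySem.Str.lower value))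
      = (yamlKeywords.contains (PySem.Str.lower value) || (yamlScanB true value.toList).1) := by
    have h1 : (" " : String).toList = [' '] := rfl
    have h2 : ("-" : String).toList = ['-'] := rfl
    rw [yamlScanB_fst_true, PySem.Str.startswith_eq, PySem.Str.startswith_eq,
      PySem.Str.endswith_eq, h1, h2, anyA_eq, startswith_singleton, startswith_singleton,
      endswith_singleton, Bool.eq_iff_iff]
    simp only [Bool.or_eq_true]
    tauto
  rw [hcond]
  by_cases h : (yamlKeywords.contains (PySem.Str.lower value)
      || (yamlScanB true value.toList).1) = true
  · rw [if_pos h, if_pos h]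
    have hesc : PySem.Str.replace (PySem.Str.replace value "\\" "\\\\") "\"" "\\\""
        = String.ofList (yamlScanB true value.toList).2 := by
      rw [yamlScanB_snd]
      show String.ofList (PySem.Chars.replace (PySem.Str.replace value "\\" "\\\\").toList
            ("\"" : String).toList ("\\\"" : String).toList) = _
      rw [show PySem.Str.replace value "\\" "\\\\"
            = String.ofList (PySem.Chars.replace value.toList ("\\" : String).toList
                ("\\\\" : String).toList) from rfl,
        String.toList_ofList]
      rw [show ("\\" : String).toList = ['\\'] from rfl,
        show ("\\\\" : String).toList = ['\\', '\\'] from rfl,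
        show ("\"" : String).toList = ['"'] from rfl,
        show ("\\\"" : String).toList = ['\\', '"'] from rfl,
        double_replace_eq]
    rw [hesc]
  · rw [if_neg h, if_neg h]
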